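-- pv_equiv track=rewrite | github.com/JowettC/IS1702-CT | QuestionsAsked/1.py | mysteryr
-- ===== SOURCE A (Python) =====
-- def mysteryr(n,x=1,y=3,z=5):
--     if n == 0:
--         return 1
--     if n == 1:
--         return 3
--     if n == 2:
--         return z
--     return mysteryr(n-1,y,z,z +(y**2)+(x**3))
-- ===== SOURCE B (Python) =====
-- def mysteryr(n, x=1, y=3, z=5):
--     if n == 0:
--         return 1
--     if n == 1:
--         return 3
--     while n > 2:
--         x, y, z = y, z, z + y**2 + x**3
--         n -= 1
--     return z
-- ===== Notes on version B (the rewrite author's own statement) =====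
-- stated objective: simpler
-- what changed: Replaced the tail recursion with an iterative while-loop maintaining the sliding window (x, y, z) and decrementing n.
import Mathlib
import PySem

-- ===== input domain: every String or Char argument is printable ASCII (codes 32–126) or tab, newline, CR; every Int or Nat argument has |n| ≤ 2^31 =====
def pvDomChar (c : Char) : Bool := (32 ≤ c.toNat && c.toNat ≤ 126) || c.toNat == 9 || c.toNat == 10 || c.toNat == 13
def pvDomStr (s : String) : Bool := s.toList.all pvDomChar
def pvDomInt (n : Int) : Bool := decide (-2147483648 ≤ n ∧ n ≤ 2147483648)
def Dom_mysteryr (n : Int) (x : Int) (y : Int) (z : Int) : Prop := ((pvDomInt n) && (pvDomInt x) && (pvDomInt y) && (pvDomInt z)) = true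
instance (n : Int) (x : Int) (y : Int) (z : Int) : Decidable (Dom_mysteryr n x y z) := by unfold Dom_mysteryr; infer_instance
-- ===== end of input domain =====

-- B replaces A's tail recursion by a while-loop over (x, y, z); objective: simpler (constant stack).
-- ===== PORT A =====
def mysteryr (n : Int) (x : Int) (y : Int) (z : Int) : Int :=
  if n = 0 then 1
  else if n = 1 then 3
  else if n = 2 then z
  else if 2 < n then mysteryr (n - 1) y z (z + y ^ 2 + x ^ 3)
  else 0  -- unreachable under Pre_mysteryr (Python A recurses without a base case here)
termination_by n.toNat
decreasing_by omega

-- ===== PORT B =====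
-- the 'while n > 2' loop of Source B; it runs (n-2).toNat times
def mysteryrLoop (fuel : Nat) (x : Int) (y : Int) (z : Int) : Int :=
  match fuel with
  | 0 => z
  | f + 1 => mysteryrLoop f y z (z + y ^ 2 + x ^ 3)

def mysteryr_alt (n : Int) (x : Int) (y : Int) (z : Int) : Int :=
  if n = 0 then 1
  else if n = 1 then 3
  else mysteryrLoop (n - 2).toNat x y z

-- ===== PRECONDITION & SPEC =====
-- Pre_ excludes n < 0, where Python A recurses forever and raises RecursionError.
def Pre_mysteryr (n : Int) (x : Int) (y : Int) (z : Int) : Prop := 0 ≤ n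
instance (n : Int) (x : Int) (y : Int) (z : Int) : Decidable (Pre_mysteryr n x y z) := by unfold Pre_mysteryr; infer_instance
def pvWitness_mysteryr : Int × Int × Int × Int := (5, 1, 3, 5)
def Spec_mysteryr (n : Int) (x : Int) (y : Int) (z : Int) (out : Int) : Prop := out = mysteryr_alt n x y z
instance (n : Int) (x : Int) (y : Int) (z : Int) (out : Int) : Decidable (Spec_mysteryr n x y z out) := by unfold Spec_mysteryr; infer_instance

-- ===== CLAIM (what is proved, stated in full; the proofs are below) =====
def Claim_equal_mysteryr : Prop := ∀ (n : Int) (x : Int) (y : Int) (z : Int), Dom_mysteryr n x y z → Pre_mysteryr n x y z → Spec_mysteryr n x y z (mysteryr n x y z)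

-- ===== LEMMAS AND PROOFS =====

theorem mysteryr_key : ∀ (k : Nat) (n x y z : Int), 2 ≤ n → (n - 2).toNat = k →
    mysteryr n x y z = mysteryrLoop k x y z := by
  intro k
  induction k with
  | zero =>
    intro n x y z hn hk
    have hn2 : n = 2 := by omega
    subst hn2
    simp [mysteryr, mysteryrLoop]
  | succ f ih =>
    intro n x y z hn hk
    have hn3 : 3 ≤ n := by omega
    rw [mysteryr]
    have h0 : ¬ n = 0 := by omega
    have h1 : ¬ n = 1 := by omega
    have h2 : ¬ n = 2 := by omega
    simp only [h0, h1, h2, if_false, if_pos (by omega : (2:Int) < n)]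
    rw [ih (n - 1) y z (z + y ^ 2 + x ^ 3) (by omega) (by omega)]
    rfl

-- ===== VERDICT (by name: the statement is the Claim_ definition above) =====
theorem mysteryr_spec : Claim_equal_mysteryr := by
  intro n x y z _ hpre
  unfold Spec_mysteryr mysteryr_alt
  by_cases h0 : n = 0
  · subst h0; simp [mysteryr]
  · by_cases h1 : n = 1
    · subst h1; simp [mysteryr]
    · simp only [h0, h1, if_false]
      exact mysteryr_key (n - 2).toNat n x y z (by unfold Pre_mysteryr at hpre; omega) rfl
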